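-- pv_equiv track=rewrite | github.com/amitmakhija/python | max_min_subarray.py | solve
-- ===== SOURCE A (Python) =====
-- def solve(lst):
--     arg_min = min(lst)
--     arg_max = max(lst)
--     min_i = None
--     max_i = None
--     ans = len(lst)
--
--     if arg_min == arg_max:
--         ans = 1
--     else:
--         for i in range(len(lst)-1, -1, -1):
--             if lst[i] == arg_min:
--                 min_i = i
--             elif lst[i] == arg_max:
--                 max_i = i
--
--             if min_i is not None and max_i is not None:
--                 ans = min(ans,abs(min_i-max_i))
--
--     return ans
-- ===== SOURCE B (Python) =====
-- def solve(lst):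
--     arg_min = min(lst)
--     arg_max = max(lst)
--     if arg_min == arg_max:
--         return 1
--     mins = [i for i, x in enumerate(lst) if x == arg_min]
--     maxs = [i for i, x in enumerate(lst) if x == arg_max]
--     best = len(lst)
--     a = b = 0
--     while a < len(mins) and b < len(maxs):
--         d = abs(mins[a] - maxs[b])
--         if d < best:
--             best = d
--         if mins[a] < maxs[b]:
--             a += 1
--         else:
--             b += 1
--     return best
-- ===== Notes on version B (the rewrite author's own statement) =====
-- stated objective: alternative
-- what changed: Replaces A's backward scan with a nearest-seen-min/max state machine by collecting the ascending index lists of min and max positions and merging them with a two-pointer walk that tracks the smallest gap.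
import Mathlib
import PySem

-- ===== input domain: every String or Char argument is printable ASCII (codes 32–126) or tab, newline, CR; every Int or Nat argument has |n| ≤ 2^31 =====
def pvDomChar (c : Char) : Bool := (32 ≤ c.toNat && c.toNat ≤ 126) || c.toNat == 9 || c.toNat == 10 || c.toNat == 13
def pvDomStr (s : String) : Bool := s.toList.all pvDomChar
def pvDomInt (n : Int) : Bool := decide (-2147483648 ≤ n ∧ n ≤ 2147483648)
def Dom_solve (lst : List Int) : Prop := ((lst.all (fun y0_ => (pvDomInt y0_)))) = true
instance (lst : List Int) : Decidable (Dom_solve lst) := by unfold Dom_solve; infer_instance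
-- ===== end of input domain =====

-- B replaces A's backward scan (state machine over nearest seen min/max index) by a
-- two-pointer merge of the ascending min-position and max-position index lists.

-- ===== PORT A =====
-- loop body of A's 'for i in range(len(lst)-1, -1, -1)' (a named helper for the let-lambda)
def solveStep (lst : List Int) (arg_min arg_max : Int)
    (st : Option Int × Option Int × Int) (i : Int) : Option Int × Option Int × Int :=
  let v := PySem.List.pyGetD lst i 0
  let min_i := if v = arg_min then some i else st.1
  let max_i := if v = arg_min then st.2.1 else if v = arg_max then some i else st.2.1
  let ans := match min_i, max_i with
    | some a, some b => min st.2.2 |a - b|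
    | _, _ => st.2.2
  (min_i, max_i, ans)

def solve (lst : List Int) : Int :=
  let arg_min := (PySem.List.min? lst (fun x => x)).getD 0
  let arg_max := (PySem.List.max? lst (fun x => x)).getD 0
  if arg_min = arg_max then 1
  else
    ((PySem.List.pyRange ((lst.length : Int) - 1) (-1) (-1)).foldl
      (solveStep lst arg_min arg_max) (none, none, (lst.length : Int))).2.2

-- ===== PORT B =====
-- the two-pointer while loop of Source B
def tpLoop (best : Int) (ps qs : List Int) : Int :=
  match ps, qs with
  | [], _ => best
  | _, [] => best
  | p :: ps', q :: qs' =>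
      let best' := if |p - q| < best then |p - q| else best
      if p < q then tpLoop best' ps' (q :: qs') else tpLoop best' (p :: ps') qs'
termination_by ps.length + qs.length

def solve_alt (lst : List Int) : Int :=
  let arg_min := (PySem.List.min? lst (fun x => x)).getD 0
  let arg_max := (PySem.List.max? lst (fun x => x)).getD 0
  if arg_min = arg_max then 1
  else
    let mins := ((PySem.List.enumerate lst).filter (fun p => p.2 == arg_min)).map (fun p => p.1)
    let maxs := ((PySem.List.enumerate lst).filter (fun p => p.2 == arg_max)).map (fun p => p.1)
    tpLoop (lst.length : Int) mins maxs

-- ===== PRECONDITION & SPEC =====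
-- Pre_ excludes exactly the empty list, on which Python's min(lst) raises ValueError.
def Pre_solve (lst : List Int) : Prop := lst ≠ []
instance (lst : List Int) : Decidable (Pre_solve lst) := by unfold Pre_solve; infer_instance
def pvWitness_solve : List Int := ([3, 1, 2, 3, 1])

def Spec_solve (lst : List Int) (out : Int) : Prop := out = solve_alt lst
instance (lst : List Int) (out : Int) : Decidable (Spec_solve lst out) := by unfold Spec_solve; infer_instance

-- ===== CLAIM (what is proved, stated in full; the proofs are below) =====
def Claim_equal_solve : Prop := ∀ (lst : List Int), Dom_solve lst → Pre_solve lst → Spec_solve lst (solve lst)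

-- ===== LEMMAS AND PROOFS =====

-- ascending list of the positions (counted from s) at which v occurs
def posns (v : Int) (s : Int) : List Int → List Int
  | [] => []
  | x :: t => if x = v then s :: posns v (s + 1) t else posns v (s + 1) t

-- all |p - q| for p ∈ ps, q ∈ qs
def crossG (ps qs : List Int) : List Int := ps.flatMap (fun p => qs.map (fun q => |p - q|))

-- min over b and all cross gaps: the common characterisation of both loops
def gMin (b : Int) (ps qs : List Int) : Int := (crossG ps qs).foldl min b

lemma mem_crossG {z : Int} {ps qs : List Int} :
    z ∈ crossG ps qs ↔ ∃ p ∈ ps, ∃ q ∈ qs, z = |p - q| := by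
  simp [crossG, eq_comm]

lemma fm_le_init (b : Int) (l : List Int) : l.foldl min b ≤ b := by
  induction l generalizing b with
  | nil => simp
  | cons x t ih => exact le_trans (ih (min b x)) (min_le_left _ _)

lemma fm_le_mem (b : Int) {x : Int} {l : List Int} (h : x ∈ l) : l.foldl min b ≤ x := by
  induction l generalizing b with
  | nil => cases h
  | cons y t ih =>
      simp only [List.foldl_cons]
      rcases List.mem_cons.mp h with rfl | hx
      · exact le_trans (fm_le_init _ _) (min_le_right _ _)
      · exact ih _ hx

lemma fm_cases (b : Int) (l : List Int) : l.foldl min b = b ∨ l.foldl min b ∈ l := by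
  induction l generalizing b with
  | nil => left; rfl
  | cons x t ih =>
      simp only [List.foldl_cons]
      rcases ih (min b x) with h | h
      · rcases min_cases b x with ⟨he, _⟩ | ⟨he, _⟩
        · left; rw [h, he]
        · right; rw [h, he]; simp
      · right; exact List.mem_cons_of_mem _ h

lemma gMin_le_init (b : Int) (ps qs : List Int) : gMin b ps qs ≤ b := fm_le_init _ _

lemma gMin_cases (b : Int) (ps qs : List Int) :
    gMin b ps qs = b ∨ gMin b ps qs ∈ crossG ps qs := fm_cases _ _

lemma gMin_le_mem {b z : Int} {ps qs : List Int} (h : z ∈ crossG ps qs) :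
    gMin b ps qs ≤ z := fm_le_mem _ h

lemma gMin_le_pair (b : Int) {p q : Int} {ps qs : List Int} (hp : p ∈ ps) (hq : q ∈ qs) :
    gMin b ps qs ≤ |p - q| := gMin_le_mem (mem_crossG.mpr ⟨p, hp, q, hq, rfl⟩)

-- generic update step: enlarging the cross set by pairs all dominated by c gives min · c
lemma gMin_eq_min (b c : Int) (ps qs ps' qs' : List Int)
    (hsub : ∀ z ∈ crossG ps' qs', z ∈ crossG ps qs)
    (hc : c ∈ crossG ps qs)
    (hdom : ∀ z ∈ crossG ps qs, z ∈ crossG ps' qs' ∨ c ≤ z) :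
    gMin b ps qs = min (gMin b ps' qs') c := by
  apply le_antisymm
  · apply le_min
    · rcases gMin_cases b ps' qs' with h | h
      · exact le_of_le_of_eq (gMin_le_init b ps qs) h.symm
      · exact gMin_le_mem (hsub _ h)
    · exact gMin_le_mem hc
  · rcases gMin_cases b ps qs with h | h
    · rw [h]; exact le_trans (min_le_left _ _) (gMin_le_init _ _ _)
    · rcases hdom _ h with h2 | h2
      · exact le_trans (min_le_left _ _) (gMin_le_mem h2)
      · exact le_trans (min_le_right _ _) h2

lemma posns_ge (v : Int) (s : Int) (l : List Int) : ∀ j ∈ posns v s l, s ≤ j := by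
  induction l generalizing s with
  | nil => intro j h; cases h
  | cons x t ih =>
      intro j h
      by_cases hx : x = v
      · simp only [posns, if_pos hx, List.mem_cons] at h
        rcases h with rfl | h
        · exact le_refl _
        · exact le_trans (by omega) (ih (s + 1) j h)
      · simp only [posns, if_neg hx] at h
        exact le_trans (by omega) (ih (s + 1) j h)

lemma posns_pairwise (v : Int) (s : Int) (l : List Int) :
    (posns v s l).Pairwise (· ≤ ·) := by
  induction l generalizing s with
  | nil => exact List.Pairwise.nil
  | cons x t ih =>
      by_cases hx : x = v
      · simp only [posns, if_pos hx]
        exact List.Pairwise.cons (fun j hj => le_trans (by omega) (posns_ge v (s+1) t j hj)) (ih (s+1))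
      · simp only [posns, if_neg hx]; exact ih (s + 1)

lemma head_le_of_sorted {l : List Int} {q : Int} (h : l.head? = some q)
    (hp : l.Pairwise (· ≤ ·)) : ∀ y ∈ l, q ≤ y := by
  cases l with
  | nil => cases h
  | cons a t =>
      simp only [List.head?_cons, Option.some.injEq] at h
      subst h
      intro y hy
      rcases List.mem_cons.mp hy with rfl | hy
      · exact le_refl _
      · exact (List.pairwise_cons.mp hp).1 y hy

-- the three behaviour lemmas for the two-pointer loop
lemma tp_le_init (b : Int) (ps qs : List Int) : tpLoop b ps qs ≤ b := by
  induction b, ps, qs using tpLoop.induct with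
  | case1 b qs => simp [tpLoop]
  | case2 b ps hne =>
      cases ps with
      | nil => exact absurd rfl hne
      | cons x t => simp [tpLoop]
  | case3 b p ps' q qs' best' hlt ih =>
      have hbv : best' = if |p - q| < b then |p - q| else b := rfl
      rw [hbv] at ih
      rw [tpLoop]; simp only [if_pos hlt]
      refine le_trans ih ?_
      split <;> omega
  | case4 b p ps' q qs' best' hlt ih =>
      have hbv : best' = if |p - q| < b then |p - q| else b := rfl
      rw [hbv] at ih
      rw [tpLoop]; simp only [if_neg hlt]
      refine le_trans ih ?_
      split <;> omega

lemma tp_cases (b : Int) (ps qs : List Int) :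
    tpLoop b ps qs = b ∨ ∃ p ∈ ps, ∃ q ∈ qs, tpLoop b ps qs = |p - q| := by
  induction b, ps, qs using tpLoop.induct with
  | case1 b qs => left; simp [tpLoop]
  | case2 b ps hne =>
      cases ps with
      | nil => exact absurd rfl hne
      | cons x t => left; simp [tpLoop]
  | case3 b p ps' q qs' best' hlt ih =>
      have hbv : best' = if |p - q| < b then |p - q| else b := rfl
      rw [hbv] at ih
      rw [tpLoop]; simp only [if_pos hlt]
      rcases ih with h | ⟨x, hx, y, hy, h⟩
      · rw [h]
        by_cases hd : |p - q| < b
        · right; exact ⟨p, by simp, q, by simp, by simp [hd]⟩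
        · left; simp [hd]
      · right; exact ⟨x, List.mem_cons_of_mem _ hx, y, hy, h⟩
  | case4 b p ps' q qs' best' hlt ih =>
      have hbv : best' = if |p - q| < b then |p - q| else b := rfl
      rw [hbv] at ih
      rw [tpLoop]; simp only [if_neg hlt]
      rcases ih with h | ⟨x, hx, y, hy, h⟩
      · rw [h]
        by_cases hd : |p - q| < b
        · right; exact ⟨p, by simp, q, by simp, by simp [hd]⟩
        · left; simp [hd]
      · right; exact ⟨x, hx, y, List.mem_cons_of_mem _ hy, h⟩

lemma tp_le_pair (b : Int) (ps qs : List Int) :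
    ps.Pairwise (· ≤ ·) → qs.Pairwise (· ≤ ·) →
    ∀ p ∈ ps, ∀ q ∈ qs, tpLoop b ps qs ≤ |p - q| := by
  induction b, ps, qs using tpLoop.induct with
  | case1 b qs => intro _ _ p hp; cases hp
  | case2 b ps hne => intro _ _ p hp q hq; cases hq
  | case3 b p ps' q qs' best' hlt ih =>
      have hbv : best' = if |p - q| < b then |p - q| else b := rfl
      rw [hbv] at ih
      intro hps hqs x hx y hy
      rw [tpLoop]; simp only [if_pos hlt]
      rcases List.mem_cons.mp hx with rfl | hx'
      · have hqy : q ≤ y := head_le_of_sorted (l := q :: qs') rfl hqs y hy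
        have h1 : tpLoop (if |x - q| < b then |x - q| else b) ps' (q :: qs') ≤
            (if |x - q| < b then |x - q| else b) := tp_le_init _ _ _
        have h2 : (if |x - q| < b then |x - q| else b) ≤ |x - q| := by split <;> omega
        have h3 : |x - q| ≤ |x - y| := by
          rw [abs_of_nonpos (by omega), abs_of_nonpos (by omega)]; omega
        omega
      · exact ih (List.Pairwise.sublist (List.sublist_cons_self _ _) hps) hqs x hx' y hy
  | case4 b p ps' q qs' best' hlt ih =>
      have hbv : best' = if |p - q| < b then |p - q| else b := rfl
      rw [hbv] at ih
      intro hps hqs x hx y hy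
      rw [tpLoop]; simp only [if_neg hlt]
      rcases List.mem_cons.mp hy with rfl | hy'
      · have hpx : p ≤ x := head_le_of_sorted (l := p :: ps') rfl hps x hx
        have h1 : tpLoop (if |p - y| < b then |p - y| else b) (p :: ps') qs' ≤
            (if |p - y| < b then |p - y| else b) := tp_le_init _ _ _
        have h2 : (if |p - y| < b then |p - y| else b) ≤ |p - y| := by split <;> omega
        have h3 : |p - y| ≤ |x - y| := by
          rw [abs_of_nonneg (by omega), abs_of_nonneg (by omega)]; omega
        omega
      · exact ih hps (List.Pairwise.sublist (List.sublist_cons_self _ _) hqs) x hx y hy'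

lemma tp_eq_gMin (b : Int) (ps qs : List Int)
    (hps : ps.Pairwise (· ≤ ·)) (hqs : qs.Pairwise (· ≤ ·)) :
    tpLoop b ps qs = gMin b ps qs := by
  apply le_antisymm
  · rcases gMin_cases b ps qs with h | h
    · rw [h]; exact tp_le_init _ _ _
    · rcases mem_crossG.mp h with ⟨p, hp, q, hq, he⟩
      exact le_of_le_of_eq (tp_le_pair b ps qs hps hqs p hp q hq) he.symm
  · rcases tp_cases b ps qs with h | ⟨p, hp, q, hq, h⟩
    · rw [h]; exact gMin_le_init _ _ _
    · rw [h]; exact gMin_le_pair _ hp hq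

-- A's loop body preserves the invariant
lemma stepA (lst : List Int) (mn mx : Int) (hne : mn ≠ mx) (i : Nat) (hi : i < lst.length)
    (st : Option Int × Option Int × Int)
    (h1 : st.1 = (posns mn (↑(i+1)) (lst.drop (i+1))).head?)
    (h2 : st.2.1 = (posns mx (↑(i+1)) (lst.drop (i+1))).head?)
    (h3 : st.2.2 = gMin (lst.length : Int)
            (posns mn (↑(i+1)) (lst.drop (i+1))) (posns mx (↑(i+1)) (lst.drop (i+1)))) :
    (solveStep lst mn mx st (i : Int)).1 = (posns mn (i : Int) (lst.drop i)).head? ∧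
    (solveStep lst mn mx st (i : Int)).2.1 = (posns mx (i : Int) (lst.drop i)).head? ∧
    (solveStep lst mn mx st (i : Int)).2.2
      = gMin (lst.length : Int) (posns mn (i : Int) (lst.drop i)) (posns mx (i : Int) (lst.drop i)) := by
  have hdrop : lst.drop i = lst[i] :: lst.drop (i + 1) := List.drop_eq_getElem_cons hi
  have hv : PySem.List.pyGetD lst (i : Int) 0 = lst[i] := by
    rw [PySem.List.pyGetD_natCast]; exact List.getD_eq_getElem _ _ hi
  have hcast : ((i : Int) + 1) = ((i + 1 : Nat) : Int) := by push_cast; ring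
  have hgeP : ∀ y ∈ posns mn (↑(i+1)) (lst.drop (i+1)), ((i+1 : Nat) : Int) ≤ y :=
    posns_ge _ _ _
  have hgeQ : ∀ y ∈ posns mx (↑(i+1)) (lst.drop (i+1)), ((i+1 : Nat) : Int) ≤ y :=
    posns_ge _ _ _
  have hne' : ¬ (mx = mn) := fun h => hne h.symm
  by_cases hmn : lst[i] = mn
  · -- lst[i] == arg_min branch
    have hnmx : ¬ (lst[i] = mx) := by rw [hmn]; exact hne
    have hPi : posns mn (i : Int) (lst.drop i)
        = (i : Int) :: posns mn (↑(i+1)) (lst.drop (i+1)) := by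
      rw [hdrop]; simp only [posns]; rw [if_pos hmn, hcast]
    have hQi : posns mx (i : Int) (lst.drop i) = posns mx (↑(i+1)) (lst.drop (i+1)) := by
      rw [hdrop]; simp only [posns]; rw [if_neg hnmx, hcast]
    refine ⟨by rw [hPi]; simp [solveStep, hv, hmn], by rw [hQi, ← h2]; simp [solveStep, hv, hmn], ?_⟩
    rw [hPi, hQi]
    cases hQ : posns mx (↑(i+1)) (lst.drop (i+1)) with
    | nil =>
        have hstn : st.2.1 = none := by rw [h2, hQ]; rfl
        have hstep : (solveStep lst mn mx st (i : Int)).2.2 = st.2.2 := by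
          simp [solveStep, hv, hmn, hstn]
        rw [hQ] at h3
        rw [hstep, h3]
        simp [gMin, crossG]
    | cons q qs' =>
        have hstq : st.2.1 = some q := by rw [h2, hQ]; rfl
        have hstep : (solveStep lst mn mx st (i : Int)).2.2 = min st.2.2 |(i : Int) - q| := by
          simp [solveStep, hv, hmn, hstq]
        have hpair := posns_pairwise mx (↑(i+1) : Int) (lst.drop (i+1))
        rw [hQ] at h3 hgeQ hpair
        have hq : q ∈ q :: qs' := by simp
        have hdomq : ∀ y ∈ q :: qs', q ≤ y := head_le_of_sorted rfl hpair
        rw [hstep, h3]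
        refine (gMin_eq_min _ (|(i : Int) - q|) ((i : Int) :: posns mn (↑(i+1)) (lst.drop (i+1)))
          (q :: qs') _ _ ?_ ?_ ?_).symm
        · intro z hz
          rcases mem_crossG.mp hz with ⟨p, hp, y, hy, rfl⟩
          exact mem_crossG.mpr ⟨p, List.mem_cons_of_mem _ hp, y, hy, rfl⟩
        · exact mem_crossG.mpr ⟨(i : Int), by simp, q, hq, rfl⟩
        · intro z hz
          rcases mem_crossG.mp hz with ⟨p, hp, y, hy, rfl⟩
          rcases List.mem_cons.mp hp with rfl | hp'
          · right
            have hy1 := hgeQ y hy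
            have hq1 := hgeQ q hq
            have hqy := hdomq y hy
            have e1 : |(i : Int) - q| = q - (i : Int) := by rw [abs_of_nonpos (by omega)]; ring
            have e2 : |(i : Int) - y| = y - (i : Int) := by rw [abs_of_nonpos (by omega)]; ring
            omega
          · exact Or.inl (mem_crossG.mpr ⟨p, hp', y, hy, rfl⟩)
  · by_cases hmx : lst[i] = mx
    · -- elif lst[i] == arg_max branch
      have hPi : posns mn (i : Int) (lst.drop i) = posns mn (↑(i+1)) (lst.drop (i+1)) := by
        rw [hdrop]; simp only [posns]; rw [if_neg hmn, hcast]
      have hQi : posns mx (i : Int) (lst.drop i)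
          = (i : Int) :: posns mx (↑(i+1)) (lst.drop (i+1)) := by
        rw [hdrop]; simp only [posns]; rw [if_pos hmx, hcast]
      refine ⟨by rw [hPi, ← h1]; simp [solveStep, hv, hmn],
              by rw [hQi]; simp [solveStep, hv, hmx, hne'], ?_⟩
      rw [hPi, hQi]
      cases hP : posns mn (↑(i+1)) (lst.drop (i+1)) with
      | nil =>
          have hstn : st.1 = none := by rw [h1, hP]; rfl
          have hstep : (solveStep lst mn mx st (i : Int)).2.2 = st.2.2 := by
            simp [solveStep, hv, hmx, hne', hstn]
          rw [hP] at h3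
          rw [hstep, h3]
          simp [gMin, crossG]
      | cons p ps' =>
          have hstp : st.1 = some p := by rw [h1, hP]; rfl
          have hstep : (solveStep lst mn mx st (i : Int)).2.2 = min st.2.2 |p - (i : Int)| := by
            simp [solveStep, hv, hmx, hne', hstp]
          have hpair := posns_pairwise mn (↑(i+1) : Int) (lst.drop (i+1))
          rw [hP] at h3 hgeP hpair
          have hp : p ∈ p :: ps' := by simp
          have hdomp : ∀ y ∈ p :: ps', p ≤ y := head_le_of_sorted rfl hpair
          rw [hstep, h3]
          refine (gMin_eq_min _ (|p - (i : Int)|) (p :: ps')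
            ((i : Int) :: posns mx (↑(i+1)) (lst.drop (i+1))) _ _ ?_ ?_ ?_).symm
          · intro z hz
            rcases mem_crossG.mp hz with ⟨x, hx, y, hy, rfl⟩
            exact mem_crossG.mpr ⟨x, hx, y, List.mem_cons_of_mem _ hy, rfl⟩
          · exact mem_crossG.mpr ⟨p, hp, (i : Int), by simp, rfl⟩
          · intro z hz
            rcases mem_crossG.mp hz with ⟨x, hx, y, hy, rfl⟩
            rcases List.mem_cons.mp hy with rfl | hy'
            · right
              have hx1 := hgeP x hx
              have hp1 := hgeP p hp
              have hpx := hdomp x hx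
              have e1 : |p - (i : Int)| = p - (i : Int) := by rw [abs_of_nonneg (by omega)]
              have e2 : |x - (i : Int)| = x - (i : Int) := by rw [abs_of_nonneg (by omega)]
              omega
            · exact Or.inl (mem_crossG.mpr ⟨x, hx, y, hy', rfl⟩)
    · -- neither branch: positions unchanged
      have hPi : posns mn (i : Int) (lst.drop i) = posns mn (↑(i+1)) (lst.drop (i+1)) := by
        rw [hdrop]; simp only [posns]; rw [if_neg hmn, hcast]
      have hQi : posns mx (i : Int) (lst.drop i) = posns mx (↑(i+1)) (lst.drop (i+1)) := by
        rw [hdrop]; simp only [posns]; rw [if_neg hmx, hcast]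
      refine ⟨by rw [hPi, ← h1]; simp [solveStep, hv, hmn],
              by rw [hQi, ← h2]; simp [solveStep, hv, hmn, hmx], ?_⟩
      rw [hPi, hQi]
      cases hP : (posns mn (↑(i+1)) (lst.drop (i+1))).head? with
      | none =>
          have hstn : st.1 = none := by rw [h1, hP]
          have hstep : (solveStep lst mn mx st (i : Int)).2.2 = st.2.2 := by
            simp [solveStep, hv, hmn, hmx, hstn]
          rw [hstep, h3]
      | some p =>
          cases hQ : (posns mx (↑(i+1)) (lst.drop (i+1))).head? with
          | none =>
              have h1' : st.1 = some p := by rw [h1, hP]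
              have h2' : st.2.1 = none := by rw [h2, hQ]
              have hstep : (solveStep lst mn mx st (i : Int)).2.2 = st.2.2 := by
                simp [solveStep, hv, hmn, hmx, h1', h2']
              rw [hstep, h3]
          | some q =>
              have h1' : st.1 = some p := by rw [h1, hP]
              have h2' : st.2.1 = some q := by rw [h2, hQ]
              have hstep : (solveStep lst mn mx st (i : Int)).2.2 = min st.2.2 |p - q| := by
                simp [solveStep, hv, hmn, hmx, h1', h2']
              have hp : p ∈ posns mn (↑(i+1)) (lst.drop (i+1)) := List.mem_of_mem_head? (by rw [hP]; rfl)
              have hq : q ∈ posns mx (↑(i+1)) (lst.drop (i+1)) := List.mem_of_mem_head? (by rw [hQ]; rfl)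
              rw [hstep, h3]
              exact min_eq_left (gMin_le_pair _ hp hq)

-- running A's loop from index i-1 down to 0 with a state satisfying the invariant
lemma loopA (lst : List Int) (mn mx : Int) (hne : mn ≠ mx) :
    ∀ (i : Nat), i ≤ lst.length → ∀ st : Option Int × Option Int × Int,
      st.1 = (posns mn (i : Int) (lst.drop i)).head? →
      st.2.1 = (posns mx (i : Int) (lst.drop i)).head? →
      st.2.2 = gMin (lst.length : Int) (posns mn (i : Int) (lst.drop i)) (posns mx (i : Int) (lst.drop i)) →
      ((PySem.List.pyRange ((i : Int) - 1) (-1) (-1)).foldl (solveStep lst mn mx) st).2.2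
        = gMin (lst.length : Int) (posns mn 0 lst) (posns mx 0 lst) := by
  intro i
  induction i with
  | zero =>
      intro _ st h1 h2 h3
      rw [PySem.List.pyRange_neg_one_eq_nil (by omega)]
      simpa using h3
  | succ k ih =>
      intro hk st h1 h2 h3
      have hklt : k < lst.length := by omega
      have hrange : PySem.List.pyRange (((k+1 : Nat) : Int) - 1) (-1) (-1)
          = (k : Int) :: PySem.List.pyRange ((k : Int) - 1) (-1) (-1) := by
        have : (((k+1 : Nat) : Int) - 1) = (k : Int) := by push_cast; ring
        rw [this, PySem.List.pyRange_neg_one_cons (by omega)]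
      rw [hrange, List.foldl_cons]
      obtain ⟨g1, g2, g3⟩ := stepA lst mn mx hne k hklt st
        (by rw [h1]) (by rw [h2]) (by rw [h3])
      exact ih (by omega) _ g1 g2 g3

-- Source B's comprehensions build exactly posns
lemma enumFilter_eq (lst : List Int) (v : Int) (s : Int) :
    ((PySem.List.enumerate lst s).filter (fun p => p.2 == v)).map (fun p => p.1)
      = posns v s lst := by
  induction lst generalizing s with
  | nil => simp [PySem.List.enumerate_nil, posns]
  | cons x t ih =>
      rw [PySem.List.enumerate_cons]
      by_cases hx : x = v
      · simp [posns, hx, ih]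
      · simp [posns, hx, ih]

-- ===== VERDICT (by name: the statement is the Claim_ definition above) =====
theorem solve_spec : Claim_equal_solve := by
  intro lst _ _
  unfold Spec_solve solve solve_alt
  by_cases hmm : (PySem.List.min? lst (fun x => x)).getD 0 = (PySem.List.max? lst (fun x => x)).getD 0
  · simp [hmm]
  · simp only [if_neg hmm]
    set mn := (PySem.List.min? lst (fun x => x)).getD 0
    set mx := (PySem.List.max? lst (fun x => x)).getD 0
    have hA := loopA lst mn mx hmm lst.length (le_refl _)
      (none, none, (lst.length : Int))
      (by simp [posns, List.drop_length]) (by simp [posns, List.drop_length])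
      (by simp [posns, List.drop_length, gMin, crossG])
    rw [hA]
    rw [enumFilter_eq lst mn 0, enumFilter_eq lst mx 0]
    exact (tp_eq_gMin _ _ _ (posns_pairwise _ _ _) (posns_pairwise _ _ _)).symm
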